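-- pv_equiv track=rewrite | github.com/alexchilton/kaggley | orbit_wars/planetwars_orbit_agent.py | normalize_arrivals
-- ===== SOURCE A (Python) =====
-- import math
-- from typing import Any, Dict, Iterable, List, Optional, Sequence, Tuple
--
-- def normalize_arrivals(arrivals: Sequence[Tuple[int, int, int]], horizon: int) -> List[Tuple[int, int, int]]:
--     normalized: List[Tuple[int, int, int]] = []
--     for turns, owner, ships in arrivals:
--         if ships <= 0:
--             continue
--         eta = max(1, int(math.ceil(turns)))
--         if eta > horizon:
--             continue
--         normalized.append((eta, int(owner), int(ships)))
--     normalized.sort(key=lambda item: item[0])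
--     return normalized
-- ===== SOURCE B (Python) =====
-- import math
-- from typing import List, Sequence, Tuple
--
-- def normalize_arrivals(arrivals: Sequence[Tuple[int, int, int]], horizon: int) -> List[Tuple[int, int, int]]:
--     # Two stages instead of append-then-stable-sort: (1) select the kept arrivals
--     # in one comprehension; (2) group them by eta into dict buckets (input order
--     # preserved inside each bucket) and emit the buckets over the sorted distinct
--     # etas.  Grouping by the (few) distinct etas replaces the comparison sort.
--     kept = [
--         (eta, int(owner), int(ships))
--         for turns, owner, ships in arrivals
--         if ships > 0 and (eta := max(1, int(math.ceil(turns)))) <= horizon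
--     ]
--     buckets = {}
--     for item in kept:
--         buckets.setdefault(item[0], []).append(item)
--     return [item for eta in sorted(buckets) for item in buckets[eta]]
-- ===== Notes on version B (the rewrite author's own statement) =====
-- stated objective: alternative
-- what changed: Replaces append-everything-then-stable-sort-by-eta with two stages: a filtering comprehension selecting the kept arrivals, then a group-by pass into per-eta dict buckets (input order kept inside each bucket) concatenated over the sorted distinct etas.
import Mathlib
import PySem

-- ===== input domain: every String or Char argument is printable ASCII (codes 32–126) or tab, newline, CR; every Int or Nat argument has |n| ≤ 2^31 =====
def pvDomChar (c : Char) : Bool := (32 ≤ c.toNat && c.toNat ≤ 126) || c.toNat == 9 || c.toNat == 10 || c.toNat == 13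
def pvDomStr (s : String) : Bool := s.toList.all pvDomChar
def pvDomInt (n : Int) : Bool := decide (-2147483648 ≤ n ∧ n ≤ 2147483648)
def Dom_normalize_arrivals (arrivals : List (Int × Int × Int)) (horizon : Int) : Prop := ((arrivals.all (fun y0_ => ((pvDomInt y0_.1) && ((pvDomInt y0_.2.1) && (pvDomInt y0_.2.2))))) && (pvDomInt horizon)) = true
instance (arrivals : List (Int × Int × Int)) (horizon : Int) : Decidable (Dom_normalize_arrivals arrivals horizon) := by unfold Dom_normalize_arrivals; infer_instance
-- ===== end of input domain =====

-- B selects the kept arrivals with a filtering comprehension and then groups them into per-eta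
-- dict buckets emitted over the sorted distinct etas, instead of appending to one list and
-- stable-sorting it by eta (objective: alternative).


-- ===== PORT A =====
-- for integer turns, int(math.ceil(turns)) = turns
def normalize_arrivals (arrivals : List (Int × Int × Int)) (horizon : Int) : List (Int × Int × Int) :=
  let normalized := arrivals.foldl (fun nm t =>
    if t.2.2 ≤ 0 then nm
    else
      let eta := max 1 t.1
      if eta > horizon then nm
      else nm ++ [(eta, t.2.1, t.2.2)]) []
  PySem.List.sorted normalized (fun item => item.1) false

-- ===== PORT B =====
def normalize_arrivals_alt (arrivals : List (Int × Int × Int)) (horizon : Int) : List (Int × Int × Int) :=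
  let kept := arrivals.filterMap (fun t =>
    let eta := max 1 t.1
    if 0 < t.2.2 && eta ≤ horizon then some (eta, t.2.1, t.2.2) else none)
  let buckets := kept.foldl (fun d item => d.modify item.1 [] (fun b => b ++ [item])) PySem.Dict.empty
  (PySem.List.sorted buckets.keys (fun k => k) false).flatMap (fun eta => buckets.getD eta [])

-- ===== PRECONDITION & SPEC =====
def Spec_normalize_arrivals (arrivals : List (Int × Int × Int)) (horizon : Int) (out : List (Int × Int × Int)) : Prop := out = normalize_arrivals_alt arrivals horizon
instance (arrivals : List (Int × Int × Int)) (horizon : Int) (out : List (Int × Int × Int)) : Decidable (Spec_normalize_arrivals arrivals horizon out) := by unfold Spec_normalize_arrivals; infer_instance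

-- ===== CLAIM (what is proved, stated in full; the proofs are below) =====
def Claim_equal_normalize_arrivals : Prop := ∀ (arrivals : List (Int × Int × Int)) (horizon : Int), Dom_normalize_arrivals arrivals horizon → Spec_normalize_arrivals arrivals horizon (normalize_arrivals arrivals horizon)

-- ===== LEMMAS AND PROOFS =====

-- the filter/map both programs effectively perform
def pvKeep (horizon : Int) (t : Int × Int × Int) : Bool := !(t.2.2 ≤ 0) && !(max 1 t.1 > horizon)
def pvEmit (t : Int × Int × Int) : Int × Int × Int := (max 1 t.1, t.2.1, t.2.2)

-- A's accumulation loop is filter-then-map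
lemma a_loop_eq (arrivals : List (Int × Int × Int)) (horizon : Int) (acc : List (Int × Int × Int)) :
    arrivals.foldl (fun nm t =>
      if t.2.2 ≤ 0 then nm
      else
        let eta := max 1 t.1
        if eta > horizon then nm
        else nm ++ [(eta, t.2.1, t.2.2)]) acc
    = acc ++ ((arrivals.filter (pvKeep horizon)).map pvEmit) := by
  induction arrivals generalizing acc with
  | nil => simp
  | cons t ts ih =>
    rw [List.foldl_cons, ih]
    by_cases h1 : t.2.2 ≤ 0
    · simp [pvKeep, h1]
    · by_cases h2 : max 1 t.1 > horizon
      · simp [pvKeep, h1, h2]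
      · simp [pvKeep, pvEmit, h1, h2]

-- B's comprehension is the same filter-then-map
lemma b_kept_eq (arrivals : List (Int × Int × Int)) (horizon : Int) :
    arrivals.filterMap (fun t =>
      let eta := max 1 t.1
      if 0 < t.2.2 && eta ≤ horizon then some (eta, t.2.1, t.2.2) else none)
    = (arrivals.filter (pvKeep horizon)).map pvEmit := by
  induction arrivals with
  | nil => rfl
  | cons t ts ih =>
    have hc : (decide (0 < t.2.2) && decide (max 1 t.1 ≤ horizon)) = pvKeep horizon t := by
      unfold pvKeep
      by_cases h1 : 0 < t.2.2 <;> by_cases h2 : max 1 t.1 ≤ horizon <;>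
        simp [h1, h2] <;> omega
    cases hk : pvKeep horizon t with
    | false =>
      simp only [List.filterMap_cons, List.filter_cons, hc, hk]
      simpa using ih
    | true =>
      simp only [List.filterMap_cons, List.filter_cons, hc, hk]
      rw [ih]
      simp [pvEmit]

-- inserting where a prefix refuses and the suffix accepts
lemma insertBy_middle {α : Type} (before : α → α → Bool) (x : α) (L M : List α)
    (hL : ∀ y ∈ L, before x y = false) (hM : ∀ y ∈ M, before x y = true) :
    PySem.List.insertBy before x (L ++ M) = L ++ x :: M := by
  induction L with
  | nil =>
    cases M with
    | nil => rfl
    | cons m ms => simp [PySem.List.insertBy, hM m (by simp)]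
  | cons a L ih =>
    have := ih (fun y hy => hL y (by simp [hy]))
    simp [PySem.List.insertBy, hL a (by simp), this]

-- inserting past a prefix that refuses
lemma insertBy_skip {α : Type} (before : α → α → Bool) (x : α) (L M : List α)
    (hL : ∀ y ∈ L, before x y = false) :
    PySem.List.insertBy before x (L ++ M) = L ++ PySem.List.insertBy before x M := by
  induction L with
  | nil => rfl
  | cons a L ih =>
    have := ih (fun y hy => hL y (by simp [hy]))
    simp [PySem.List.insertBy, hL a (by simp), this]

-- stable insert into a key-grouped concatenation: the key already has a bucket
lemma ins_grouped_mem (x : Int × Int × Int) (ks : List Int) (g : Int → List (Int × Int × Int))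
    (hks : ks.Pairwise (· < ·))
    (hg : ∀ k, ∀ y ∈ g k, y.1 = k)
    (hmem : x.1 ∈ ks) :
    PySem.List.insertBy (fun a b => decide (a.1 < b.1)) x (ks.flatMap g)
    = ks.flatMap (fun k => if k = x.1 then g k ++ [x] else g k) := by
  induction ks with
  | nil => simp at hmem
  | cons k ks ih =>
    rw [List.pairwise_cons] at hks
    rw [List.flatMap_cons, List.flatMap_cons]
    by_cases hx : x.1 = k
    · have h1 : ∀ y ∈ g k, (fun a b => decide (a.1 < b.1)) x y = false := fun y hy => by
        simp [hg k y hy, hx]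
      have h2 : ∀ y ∈ List.flatMap g ks, (fun a b => decide (a.1 < b.1)) x y = true := fun y hy => by
        obtain ⟨k', hk', hy'⟩ := List.mem_flatMap.mp hy
        simpa [hg k' y hy', hx] using hks.1 k' hk'
      rw [insertBy_middle _ _ _ _ h1 h2, if_pos hx.symm]
      have hcg : List.flatMap (fun k' => if k' = x.1 then g k' ++ [x] else g k') ks
          = List.flatMap g ks :=
        List.flatMap_congr (fun k' hk' => if_neg (by have := hks.1 k' hk'; omega))
      rw [hcg]; simp
    · have hmem' : x.1 ∈ ks := by
        rcases List.mem_cons.mp hmem with h | h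
        · exact absurd h hx
        · exact h
      have hkx : k < x.1 := hks.1 _ hmem'
      rw [insertBy_skip _ _ (g k) _ (fun y hy => by simp [hg k y hy]; omega),
        ih hks.2 hmem', if_neg (fun h => hx h.symm)]

-- stable insert into a key-grouped concatenation: the key is new
lemma ins_grouped_new (x : Int × Int × Int) (ks : List Int) (g : Int → List (Int × Int × Int))
    (hks : ks.Pairwise (· < ·))
    (hg : ∀ k, ∀ y ∈ g k, y.1 = k)
    (hmem : x.1 ∉ ks) :
    PySem.List.insertBy (fun a b => decide (a.1 < b.1)) x (ks.flatMap g)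
    = (PySem.List.insertBy (fun a b => decide (a < b)) x.1 ks).flatMap
        (fun k => if k = x.1 then [x] else g k) := by
  induction ks with
  | nil => simp [PySem.List.insertBy]
  | cons k ks ih =>
    rw [List.pairwise_cons] at hks
    have hxk : x.1 ≠ k := fun h => hmem (by simp [h])
    have hmem' : x.1 ∉ ks := fun h => hmem (List.mem_cons_of_mem _ h)
    by_cases hlt : x.1 < k
    · have hins : PySem.List.insertBy (fun a b => decide (a < b)) x.1 (k :: ks)
          = x.1 :: k :: ks := by
        simp [PySem.List.insertBy, hlt]
      have hM : ∀ y ∈ List.flatMap g (k :: ks), (fun a b => decide (a.1 < b.1)) x y = true := by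
        intro y hy
        obtain ⟨k', hk', hy'⟩ := List.mem_flatMap.mp hy
        have hkk : k ≤ k' := by
          rcases List.mem_cons.mp hk' with h | h
          · omega
          · exact le_of_lt (hks.1 k' h)
        simp [hg k' y hy']; omega
      have hmid := insertBy_middle (fun a b => decide (a.1 < b.1)) x []
        (List.flatMap g (k :: ks)) (fun y hy => by simp at hy) hM
      rw [List.nil_append] at hmid
      have hcg : List.flatMap (fun k' => if k' = x.1 then [x] else g k') (k :: ks)
          = List.flatMap g (k :: ks) :=
        List.flatMap_congr (fun k' hk' => if_neg (by
          have hkk : k ≤ k' := by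
            rcases List.mem_cons.mp hk' with h | h
            · omega
            · exact le_of_lt (hks.1 k' h)
          omega))
      rw [hmid, hins]
      conv_rhs => rw [List.flatMap_cons]
      rw [hcg]
      simp
    · have hkx : k < x.1 := by omega
      have hins : PySem.List.insertBy (fun a b => decide (a < b)) x.1 (k :: ks)
          = k :: PySem.List.insertBy (fun a b => decide (a < b)) x.1 ks := by
        have hnot : ¬ x.1 < k := by omega
        simp [PySem.List.insertBy, hnot]
      rw [List.flatMap_cons,
        insertBy_skip _ _ (g k) _ (fun y hy => by simp [hg k y hy]; omega),
        ih hks.2 hmem', hins, List.flatMap_cons, if_neg (show ¬ k = x.1 by omega)]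

-- appending one element to a stable sort inserts it
lemma sorted_append_singleton {α κ : Type} [LT κ] [DecidableLT κ] (l : List α) (x : α) (key : α → κ) :
    PySem.List.sorted (l ++ [x]) key false
    = PySem.List.insertBy (fun a b => decide (key a < key b)) x (PySem.List.sorted l key false) := by
  rw [PySem.List.sorted_eq_foldl_insertBy, PySem.List.sorted_eq_foldl_insertBy, List.foldl_append]
  rfl

-- the stable sort by first component = concatenation of per-key filters over the sorted distinct keys
lemma sorted_eq_grouped (L : List (Int × Int × Int)) :
    PySem.List.sorted L (fun y => y.1) false
    = (PySem.List.sorted (PySem.Set.ofList (L.map (fun y => y.1))) (fun k => k) false).flatMap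
        (fun k => L.filter (fun y => y.1 == k)) := by
  induction L using List.reverseRecOn with
  | nil => rfl
  | append_singleton L x ih =>
    rw [sorted_append_singleton, ih]
    have hks := PySem.List.sorted_ofList_pairwise_lt (L.map (fun y => y.1))
    have hg : ∀ k, ∀ y ∈ L.filter (fun y => y.1 == k), y.1 = k := by
      intro k y hy; simpa using (List.mem_filter.mp hy).2
    rw [show (L ++ [x]).map (fun y => y.1) = L.map (fun y => y.1) ++ [x.1] by simp,
      PySem.Set.ofList_append_singleton]
    by_cases hmem : x.1 ∈ L.map (fun y => y.1)
    · rw [PySem.Set.add_of_mem ((PySem.Set.mem_ofList _ _).mpr hmem)]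
      have hmem' : x.1 ∈ PySem.List.sorted (PySem.Set.ofList (L.map (fun y => y.1))) (fun k => k) false := by
        rw [PySem.List.mem_sorted]; exact (PySem.Set.mem_ofList _ _).mpr hmem
      rw [ins_grouped_mem x _ _ hks hg hmem']
      refine List.flatMap_congr (fun k hk => ?_)
      rw [List.filter_append]
      by_cases hkx : k = x.1
      · simp [hkx]
      · simp [hkx, show x.1 ≠ k from fun h => hkx h.symm]
    · rw [PySem.Set.add_of_not_mem (fun h => hmem ((PySem.Set.mem_ofList _ _).mp h)),
        sorted_append_singleton]
      have hmem' : x.1 ∉ PySem.List.sorted (PySem.Set.ofList (L.map (fun y => y.1))) (fun k => k) false := by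
        rw [PySem.List.mem_sorted, PySem.Set.mem_ofList]; exact hmem
      rw [ins_grouped_new x _ _ hks hg hmem']
      refine List.flatMap_congr (fun k hk => ?_)
      rw [List.filter_append]
      by_cases hkx : k = x.1
      · rw [if_pos hkx, hkx]
        have hnil : L.filter (fun y => y.1 == x.1) = [] := List.filter_eq_nil_iff.mpr
          (fun y hy h => hmem (List.mem_map.mpr ⟨y, hy, by simpa using h⟩))
        simp [hnil]
      · simp [hkx, show x.1 ≠ k from fun h => hkx h.symm]

-- the bucket dict's lookups and keys, in closed form
lemma bkt_getD (l : List (Int × Int × Int)) (k : Int) :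
    (l.foldl (fun d item => d.modify item.1 [] (fun b => b ++ [item])) PySem.Dict.empty).getD k []
      = l.filter (fun y => y.1 == k) := by
  have h : l.foldl (fun d item => d.modify item.1 [] (fun b => b ++ [item])) PySem.Dict.empty
      = (l.map (fun y => (y.1, y))).foldl
          (fun d p => d.modify p.1 [] (fun b => b ++ [p.2])) PySem.Dict.empty := by
    rw [List.foldl_map]
  rw [h, PySem.Dict.getD_foldl_modify_append, PySem.Dict.getD_empty, List.filter_map]
  simp [Function.comp_def, List.map_map]

lemma bkt_keys (l : List (Int × Int × Int)) :
    (l.foldl (fun d item => d.modify item.1 [] (fun b => b ++ [item])) PySem.Dict.empty).keys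
      = PySem.Set.ofList (l.map (fun y => y.1)) := by
  rw [PySem.Dict.keys_foldl_modify_key l (fun y => y.1) [] (fun _ item => (fun b => b ++ [item]))
      PySem.Dict.empty,
    PySem.Dict.keys_empty, PySem.Set.update_nil_left]

-- ===== VERDICT (by name: the statement is the Claim_ definition above) =====
theorem normalize_arrivals_spec : Claim_equal_normalize_arrivals := by
  intro arrivals horizon _
  simp only [Spec_normalize_arrivals, normalize_arrivals, normalize_arrivals_alt,
    a_loop_eq, b_kept_eq, List.nil_append, bkt_keys]
  rw [List.flatMap_congr (fun k _ => bkt_getD ((arrivals.filter (pvKeep horizon)).map pvEmit) k)]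
  exact sorted_eq_grouped _
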